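-- pv_equiv track=rewrite | github.com/alexr1993/reddit-bot | spare_parts_and_failed_attempts/training_data_finder_test.py | tick_next_sub_in_auditlist
-- ===== SOURCE A (Python) =====
-- def tick_next_sub_in_auditlist(auditlist):
--     """Takes current list and outputs the list with one more sub ticked"""
--     modified_list = []
--
--     ticked = False
--     for line in auditlist:
--
--         if line[0:len("AUDITED")] != "AUDITED" and ticked == False:
--             line = "AUDITED" + line[len("AUDITED"):]
--             ticked = True
--
--         modified_list.append(line)
--
--     return modified_list
-- ===== SOURCE B (Python) =====
-- def tick_next_sub_in_auditlist(auditlist):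
--     """Takes current list and outputs the list with one more sub ticked"""
--     k = 0
--     while k < len(auditlist) and auditlist[k][0:7] == "AUDITED":
--         k += 1
--     if k == len(auditlist):
--         return auditlist[:]
--     return auditlist[:k] + ["AUDITED" + auditlist[k][7:]] + auditlist[k + 1:]
-- ===== Notes on version B (the rewrite author's own statement) =====
-- stated objective: simpler
-- what changed: B counts the length k of the leading AUDITED block with a while loop and assembles the result from three slices auditlist[:k] + [ticked line] + auditlist[k+1:], instead of A's flag-carrying element-by-element rebuild.
import Mathlib
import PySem

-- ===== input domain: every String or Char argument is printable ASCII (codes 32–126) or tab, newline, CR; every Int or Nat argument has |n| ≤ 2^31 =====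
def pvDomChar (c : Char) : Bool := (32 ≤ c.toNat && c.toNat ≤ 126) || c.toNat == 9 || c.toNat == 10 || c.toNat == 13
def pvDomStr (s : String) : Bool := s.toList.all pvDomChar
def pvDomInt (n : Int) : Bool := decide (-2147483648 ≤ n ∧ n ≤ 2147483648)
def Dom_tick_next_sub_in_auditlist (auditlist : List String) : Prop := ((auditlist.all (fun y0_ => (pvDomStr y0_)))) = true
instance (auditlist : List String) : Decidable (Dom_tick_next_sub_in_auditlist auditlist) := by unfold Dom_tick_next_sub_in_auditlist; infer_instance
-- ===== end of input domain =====

-- B counts the leading AUDITED block and assembles the result from three slices,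
-- instead of A's flag-carrying scan that rebuilds the list element by element (simpler decomposition).

-- ===== PORT A =====
-- A: loop over auditlist with a 'ticked' flag, appending each (possibly modified) line.
def tick_next_sub_in_auditlist (auditlist : List String) : List String :=
  (auditlist.foldl
    (fun (st : List String × Bool) line =>
      if PySem.Str.slice line (some 0) (some 7) ≠ "AUDITED" ∧ st.2 = false then
        (st.1 ++ ["AUDITED" ++ PySem.Str.slice line (some 7) none], true)
      else
        (st.1 ++ [line], st.2))
    ([], false)).1

-- ===== PORT B =====
-- B's while loop 'k = 0; while k < len and auditlist[k][0:7] == "AUDITED": k += 1'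
-- ported as structural recursion scanning from the front.
def tickLeadCount : List String → Nat
  | [] => 0
  | line :: rest =>
    if PySem.Str.slice line (some 0) (some 7) = "AUDITED" then tickLeadCount rest + 1 else 0

-- B: three-segment slice assembly auditlist[:k] ++ [ticked line] ++ auditlist[k+1:].
def tick_next_sub_in_auditlist_alt (auditlist : List String) : List String :=
  let k := tickLeadCount auditlist
  if k = auditlist.length then auditlist
  else
    PySem.List.slice auditlist none (some (k : Int)) ++
      ["AUDITED" ++ PySem.Str.slice (auditlist.getD k "") (some 7) none] ++
      PySem.List.slice auditlist (some ((k : Int) + 1)) none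

-- ===== PRECONDITION & SPEC =====
def Spec_tick_next_sub_in_auditlist (auditlist : List String) (out : List String) : Prop := out = tick_next_sub_in_auditlist_alt auditlist
instance (auditlist : List String) (out : List String) : Decidable (Spec_tick_next_sub_in_auditlist auditlist out) := by unfold Spec_tick_next_sub_in_auditlist; infer_instance

-- ===== CLAIM =====
def Claim_equal_tick_next_sub_in_auditlist : Prop := ∀ (auditlist : List String), Dom_tick_next_sub_in_auditlist auditlist → Spec_tick_next_sub_in_auditlist auditlist (tick_next_sub_in_auditlist auditlist)

-- ===== LEMMAS AND PROOFS =====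

-- abbreviation for A's loop body (proof-local)
def tickStep (st : List String × Bool) (line : String) : List String × Bool :=
  if PySem.Str.slice line (some 0) (some 7) ≠ "AUDITED" ∧ st.2 = false then
    (st.1 ++ ["AUDITED" ++ PySem.Str.slice line (some 7) none], true)
  else
    (st.1 ++ [line], st.2)

theorem foldl_tickStep_true (xs : List String) (acc : List String) :
    xs.foldl tickStep (acc, true) = (acc ++ xs, true) := by
  induction xs generalizing acc with
  | nil => simp
  | cons x xs ih => simp [tickStep, ih]

theorem alt_nil : tick_next_sub_in_auditlist_alt [] = [] := by
  simp [tick_next_sub_in_auditlist_alt, tickLeadCount]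

theorem alt_full (xs : List String) (h : tickLeadCount xs = xs.length) :
    tick_next_sub_in_auditlist_alt xs = xs := by
  simp [tick_next_sub_in_auditlist_alt, h]

theorem alt_eq_take_drop (xs : List String) (h : tickLeadCount xs ≠ xs.length) :
    tick_next_sub_in_auditlist_alt xs =
      xs.take (tickLeadCount xs) ++
        ["AUDITED" ++ PySem.Str.slice (xs.getD (tickLeadCount xs) "") (some 7) none] ++
        xs.drop (tickLeadCount xs + 1) := by
  unfold tick_next_sub_in_auditlist_alt
  rw [if_neg h]
  rw [show ((tickLeadCount xs : Int) + 1) = (((tickLeadCount xs + 1 : Nat)) : Int) by push_cast; ring]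
  rw [PySem.List.slice_to_natCast, PySem.List.slice_from_natCast]

theorem alt_cons (x : String) (xs : List String) :
    tick_next_sub_in_auditlist_alt (x :: xs) =
      if PySem.Str.slice x (some 0) (some 7) ≠ "AUDITED" then
        ("AUDITED" ++ PySem.Str.slice x (some 7) none) :: xs
      else
        x :: tick_next_sub_in_auditlist_alt xs := by
  by_cases h : PySem.Str.slice x (some 0) (some 7) = "AUDITED"
  · rw [if_neg (by simp [h])]
    have hc : tickLeadCount (x :: xs) = tickLeadCount xs + 1 := by
      simp [tickLeadCount, h]
    by_cases hf : tickLeadCount xs = xs.length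
    · rw [alt_full (x :: xs) (by simp [hc, hf]), alt_full xs hf]
    · have hne : tickLeadCount (x :: xs) ≠ (x :: xs).length := by
        simp only [hc, List.length_cons]; omega
      rw [alt_eq_take_drop _ hne, alt_eq_take_drop _ hf]
      simp [hc, List.getD]
  · rw [if_pos (by simp [h])]
    have hc : tickLeadCount (x :: xs) = 0 := by simp [tickLeadCount, h]
    have hne : tickLeadCount (x :: xs) ≠ (x :: xs).length := by simp [hc]
    rw [alt_eq_take_drop _ hne]
    simp [hc, List.getD]

theorem foldl_tickStep_false (xs : List String) (acc : List String) :
    (xs.foldl tickStep (acc, false)).1 = acc ++ tick_next_sub_in_auditlist_alt xs := by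
  induction xs generalizing acc with
  | nil => simp [alt_nil]
  | cons x xs ih =>
    rw [alt_cons]
    by_cases h : PySem.Str.slice x (some 0) (some 7) ≠ "AUDITED"
    · simp [List.foldl_cons, tickStep, h, foldl_tickStep_true]
    · rw [if_neg h]
      simp only [List.foldl_cons]
      have hs : tickStep (acc, false) x = (acc ++ [x], false) := by
        simp [tickStep, h]
      rw [hs, ih (acc ++ [x])]
      simp

-- ===== VERDICT =====
theorem tick_next_sub_in_auditlist_spec : Claim_equal_tick_next_sub_in_auditlist := by
  intro auditlist _
  unfold Spec_tick_next_sub_in_auditlist tick_next_sub_in_auditlist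
  have : (fun (st : List String × Bool) line =>
      if PySem.Str.slice line (some 0) (some 7) ≠ "AUDITED" ∧ st.2 = false then
        (st.1 ++ ["AUDITED" ++ PySem.Str.slice line (some 7) none], true)
      else
        (st.1 ++ [line], st.2)) = tickStep := rfl
  rw [this]
  simpa using foldl_tickStep_false auditlist []
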